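-- pv_equiv track=rewrite | github.com/kkowenn/algorirhm-design | Final/AlgFinal1-2021/Q6-hugeM3Tile/hugeM3Tile.py | f
-- ===== SOURCE A (Python) =====
-- MOD = 44711
--
-- def mat_mult(A, B):
--     size = len(A)
--     result = [[0 for _ in range(size)] for _ in range(size)]
--     for i in range(size):
--         for j in range(size):
--             for k in range(size):
--                 result[i][j] = (result[i][j] + A[i][k] * B[k][j]) % MOD
--     return result
--
-- def mat_pow(matrix, power):
--     size = len(matrix)
--     result = [[1 if i == j else 0 for i in range(size)] for j in range(size)]  # Identity matrix
--     while power > 0: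
--         if power % 2 == 1:
--             result = mat_mult(result, matrix)
--         matrix = mat_mult(matrix, matrix)
--         power //= 2
--     return result
--
-- def f(L):
--     if L % 2 != 0:  # If L is odd, return 0
--         return 0
--     elif L == 0:
--         return 1
--     elif L == 2:
--         return 3
--
--     # Transformation matrix
--     M = [[4, -1], [1, 0]]
--
--     # Initial vector [f(2), f(0)]
--     F_init = [3, 1]
--
--     # Exponent for transformation matrix is (L//2 - 1)
--     M_exp = mat_pow(M, L // 2 - 1)
--
--     # Multiplying the matrix with the initial vector
--     F_L = [sum(M_exp[i][j] * F_init[j] for j in range(2)) % MOD for i in range(2)]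
--     return F_L[0]
-- ===== SOURCE B (Python) =====
-- MOD = 44711
--
--
-- def _uv(k):
--     # (u(k), u(k+1)) mod MOD for u(0)=0, u(1)=1, u(n)=4*u(n-1)-u(n-2),
--     # computed by fast doubling: u(2m)=2*u(m)*(u(m+1)-2*u(m)), u(2m+1)=u(m+1)^2-u(m)^2.
--     if k == 0:
--         return (0, 1)
--     a, b = _uv(k // 2)
--     e = (2 * a * (b - 2 * a)) % MOD
--     o = (b * b - a * a) % MOD
--     if k % 2 == 0:
--         return (e, o)
--     return (o, (4 * o - e) % MOD)
--
--
-- def f(L):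
--     if L % 2 != 0:  # odd length: no tiling
--         return 0
--     elif L == 0:
--         return 1
--     elif L == 2:
--         return 3
--     a, b = _uv(L // 2)  # f(2k) = u(k+1) - u(k)
--     return (b - a) % MOD
-- ===== Notes on version B (the rewrite author's own statement) =====
-- stated objective: faster
-- what changed: Replaces 2x2 matrix binary exponentiation with fast doubling of the underlying Chebyshev-like sequence u(n)=4u(n-1)-u(n-2) (u(2m)=2u(m)(u(m+1)-2u(m)), u(2m+1)=u(m+1)^2-u(m)^2), returning f(2k)=u(k+1)-u(k) mod 44711.
-- outside the precondition, e.g. on f(-2): A returns 3, B raises RecursionError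
import Mathlib
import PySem

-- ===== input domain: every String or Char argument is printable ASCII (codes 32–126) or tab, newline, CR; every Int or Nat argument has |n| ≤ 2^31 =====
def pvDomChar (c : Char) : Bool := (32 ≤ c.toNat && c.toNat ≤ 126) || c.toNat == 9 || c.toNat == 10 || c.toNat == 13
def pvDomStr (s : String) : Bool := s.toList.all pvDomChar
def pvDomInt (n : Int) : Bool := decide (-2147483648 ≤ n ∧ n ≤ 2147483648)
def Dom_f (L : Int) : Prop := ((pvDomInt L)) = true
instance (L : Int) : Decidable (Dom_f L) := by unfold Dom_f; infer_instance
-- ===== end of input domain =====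

-- B replaces A's 2x2 matrix binary exponentiation by fast doubling of the underlying
-- sequence u(n) = 4u(n-1) - u(n-2) mod 44711 (a constant-factor cheaper step: fewer multiplications per bit).

-- ===== PORT A =====
def pyMOD : Int := 44711

-- Python indexes square matrices whose indices are always in range in f's calls.
def mget (m : List (List Int)) (i j : Nat) : Int := (m.getD i []).getD j 0

-- Python's i,j,k loop nest accumulates each result[i][j] independently over k,
-- so it is ported as nested range-maps with an inner foldl over the same k-range.
def matMult (A B : List (List Int)) : List (List Int) :=
  let size := A.length
  (List.range size).map (fun i =>
    (List.range size).map (fun j =>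
      (List.range size).foldl (fun acc k =>
        (acc + mget A i k * mget B k j) % pyMOD) 0))

def matPowLoop (matrix result : List (List Int)) (power : Nat) : List (List Int) :=
  if h : power = 0 then result
  else
    let result' := if power % 2 = 1 then matMult result matrix else result
    matPowLoop (matMult matrix matrix) result' (power / 2)
termination_by power
decreasing_by exact Nat.div_lt_self (Nat.pos_of_ne_zero h) (by norm_num)

-- Python: while power > 0 — a non-positive power leaves the identity matrix untouched,
-- so the loop runs on power.toNat (0 iterations for power ≤ 0, the same trace for power > 0).
def matPow (matrix : List (List Int)) (power : Int) : List (List Int) :=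
  let size := matrix.length
  let result := (List.range size).map (fun j =>
    (List.range size).map (fun i => if i = j then (1 : Int) else 0))
  matPowLoop matrix result power.toNat

def f (L : Int) : Int :=
  if PySem.Int.mod L 2 ≠ 0 then 0
  else if L = 0 then 1
  else if L = 2 then 3
  else
    let M : List (List Int) := [[4, -1], [1, 0]]
    let Finit : List Int := [3, 1]
    let Mexp := matPow M (PySem.Int.floordiv L 2 - 1)
    let FL := (List.range 2).map (fun i =>
      ((List.range 2).foldl (fun s j => s + mget Mexp i j * Finit.getD j 0) 0) % pyMOD)
    FL.getD 0 0

-- ===== PORT B =====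
-- Python B recurses on k // 2; inside Pre_ the argument is ≥ 0, so it is ported as Nat recursion.
def uv (k : Nat) : Int × Int :=
  if h : k = 0 then (0, 1)
  else
    let p := uv (k / 2)
    let a := p.1
    let b := p.2
    let e := (2 * a * (b - 2 * a)) % 44711
    let o := (b * b - a * a) % 44711
    if k % 2 = 0 then (e, o) else (o, (4 * o - e) % 44711)
termination_by k
decreasing_by exact Nat.div_lt_self (Nat.pos_of_ne_zero h) (by norm_num)

def f_alt (L : Int) : Int :=
  if PySem.Int.mod L 2 ≠ 0 then 0
  else if L = 0 then 1
  else if L = 2 then 3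
  else
    let p := uv (PySem.Int.floordiv L 2).toNat
    (p.2 - p.1) % 44711

-- ===== PRECONDITION & SPEC =====
-- Pre_ excludes negative even L: there A returns 3 by accident (the identity matrix for a
-- negative exponent) while B's fast-doubling recursion raises RecursionError.
def Pre_f (L : Int) : Prop := 0 ≤ L ∨ L % 2 = 1
instance (L : Int) : Decidable (Pre_f L) := by unfold Pre_f; infer_instance
def pvWitness_f : Int := 10

def Spec_f (L : Int) (out : Int) : Prop := out = f_alt L
instance (L : Int) (out : Int) : Decidable (Spec_f L out) := by unfold Spec_f; infer_instance

-- ===== CLAIM (what is proved, stated in full; the proofs are below) =====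
def Claim_equal_f : Prop := ∀ (L : Int), Dom_f L → Pre_f L → Spec_f L (f L)

-- ===== LEMMAS AND PROOFS =====

-- The common mathematical object: the sequence u over ZMod 44711.
def U : Nat → ZMod 44711
  | 0 => 0
  | 1 => 1
  | n + 2 => 4 * U (n + 1) - U n

def toM (m : List (List Int)) : Matrix (Fin 2) (Fin 2) (ZMod 44711) :=
  !![((mget m 0 0 : Int) : ZMod 44711), mget m 0 1; mget m 1 0, mget m 1 1]

def Sq (m : List (List Int)) : Prop := ∃ a b c d : Int, m = [[a, b], [c, d]]

lemma cast_emod (a : Int) : (((a % 44711 : Int)) : ZMod 44711) = (a : ZMod 44711) := by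
  have h1 : ((a % 44711 : Int) : ZMod 44711) = ((a - 44711 * (a / 44711) : Int) : ZMod 44711) := by
    congr 1; omega
  rw [h1]; push_cast
  have h0 : ((44711 : Int) : ZMod 44711) = 0 :=
    (ZMod.intCast_zmod_eq_zero_iff_dvd 44711 44711).mpr ⟨1, by norm_num⟩
  push_cast at h0
  rw [h0]; ring

lemma int_eq_of_cast_eq (a b : Int) (ha : 0 ≤ a) (ha' : a < 44711) (hb : 0 ≤ b) (hb' : b < 44711)
    (h : ((a : Int) : ZMod 44711) = (b : ZMod 44711)) : a = b := by
  have hmeq := (ZMod.intCast_eq_intCast_iff a b 44711).mp h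
  have hd : (44711 : Int) ∣ b - a := Int.ModEq.dvd hmeq
  omega

lemma matMult_eval (a b c d e fx g h : Int) :
    matMult [[a, b], [c, d]] [[e, fx], [g, h]] =
      [[((0 + a * e) % pyMOD + b * g) % pyMOD, ((0 + a * fx) % pyMOD + b * h) % pyMOD],
       [((0 + c * e) % pyMOD + d * g) % pyMOD, ((0 + c * fx) % pyMOD + d * h) % pyMOD]] := rfl

lemma toM_matMult (x y : List (List Int)) (hx : Sq x) (hy : Sq y) :
    toM (matMult x y) = toM x * toM y := by
  obtain ⟨a, b, c, d, rfl⟩ := hx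
  obtain ⟨e, fx, g, h, rfl⟩ := hy
  rw [matMult_eval]
  ext i j
  fin_cases i <;> fin_cases j <;>
    simp [toM, mget, pyMOD, cast_emod, Matrix.mul_apply, Fin.sum_univ_two]

lemma sq_matMult (x y : List (List Int)) (hx : Sq x) (hy : Sq y) : Sq (matMult x y) := by
  obtain ⟨a, b, c, d, rfl⟩ := hx
  obtain ⟨e, fx, g, h, rfl⟩ := hy
  rw [matMult_eval]
  exact ⟨_, _, _, _, rfl⟩

lemma matPowLoop_spec (p : Nat) : ∀ m res, Sq m → Sq res →
    Sq (matPowLoop m res p) ∧ toM (matPowLoop m res p) = toM res * toM m ^ p := by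
  induction p using Nat.strong_induction_on with
  | _ p ih =>
    intro m res hm hres
    rw [matPowLoop]
    by_cases h : p = 0
    · subst h; simp [hres]
    · simp only [h, dif_neg, not_false_iff]
      have hdiv : p / 2 < p := Nat.div_lt_self (Nat.pos_of_ne_zero h) (by norm_num)
      have hmm : Sq (matMult m m) := sq_matMult m m hm hm
      have hres' : Sq (if p % 2 = 1 then matMult res m else res) := by
        split
        · exact sq_matMult res m hres hm
        · exact hres
      obtain ⟨hsq, heq⟩ := ih (p / 2) hdiv (matMult m m) _ hmm hres'
      refine ⟨hsq, ?_⟩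
      rw [heq, toM_matMult m m hm hm]
      have hp : p = 2 * (p / 2) + p % 2 := (Nat.div_add_mod p 2).symm.trans (by ring)
      by_cases hpar : p % 2 = 1
      · simp only [hpar, if_pos]
        rw [toM_matMult res m hres hm, mul_assoc]
        congr 1
        have hc : Commute (toM m) ((toM m * toM m) ^ (p / 2)) :=
          ((Commute.refl (toM m)).mul_right (Commute.refl (toM m))).pow_right _
        calc toM m * (toM m * toM m) ^ (p / 2)
            = (toM m * toM m) ^ (p / 2) * toM m := hc.eq
          _ = toM m ^ p := by
              conv_rhs => rw [hp, hpar]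
              rw [← sq, ← pow_mul, pow_add, pow_one]
      · have hp0 : p % 2 = 0 := by omega
        simp only [hpar, if_neg, not_false_iff]
        congr 1
        rw [← sq, ← pow_mul]
        conv_rhs => rw [hp, hp0, Nat.add_zero]

def Mz : Matrix (Fin 2) (Fin 2) (ZMod 44711) := !![4, -1; 1, 0]

lemma Mz_pow (j : Nat) : Mz ^ (j + 1) = !![U (j + 2), -U (j + 1); U (j + 1), -U j] := by
  induction j with
  | zero =>
    rw [pow_one]
    ext i j; fin_cases i <;> fin_cases j <;> simp [Mz, U]
  | succ n ih =>
    rw [pow_succ, ih]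
    ext i j
    fin_cases i <;> fin_cases j <;>
      simp [Mz, Matrix.mul_apply, Fin.sum_univ_two,
        show U (n + 3) = 4 * U (n + 2) - U (n + 1) from rfl,
        show U (n + 2) = 4 * U (n + 1) - U n from rfl] <;> ring

-- Addition formula u(m+n+1) = u(m+1)u(n+1) - u(m)u(n), by two-step recursion on m.
theorem Uadd : ∀ (m n : Nat), U (m + n + 1) = U (m + 1) * U (n + 1) - U m * U n
  | 0, n => by simp [U]
  | 1, n => by
    rw [show 1 + n + 1 = n + 2 by omega,
      show U (n + 2) = 4 * U (n + 1) - U n from rfl,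
      show U (1 + 1) = 4 * U 1 - U 0 from rfl]
    simp [U]
  | (m + 2), n => by
    have h1 := Uadd (m + 1) n
    have h0 := Uadd m n
    rw [show m + 2 + n + 1 = (m + n + 1) + 2 by omega,
      show U ((m + n + 1) + 2) = 4 * U ((m + n + 1) + 1) - U (m + n + 1) from rfl,
      show (m + n + 1) + 1 = (m + 1) + n + 1 by omega, h1, h0,
      show U (m + 2 + 1) = 4 * U (m + 1 + 1) - U (m + 1) from rfl,
      show U (m + 2) = 4 * U (m + 1) - U m from rfl]
    ring

lemma U_double (m : Nat) : U (2 * m) = 2 * U m * (U (m + 1) - 2 * U m) := by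
  cases m with
  | zero => simp [U]
  | succ mm =>
    rw [show 2 * (mm + 1) = (mm + 1) + mm + 1 by omega, Uadd (mm + 1) mm,
      show U (mm + 1 + 1) = 4 * U (mm + 1) - U mm from rfl]
    ring

lemma U_double_add_one (m : Nat) : U (2 * m + 1) = U (m + 1) * U (m + 1) - U m * U m := by
  rw [show 2 * m + 1 = m + m + 1 by omega, Uadd m m]

lemma uv_spec (k : Nat) :
    ((uv k).1 : ZMod 44711) = U k ∧ ((uv k).2 : ZMod 44711) = U (k + 1) := by
  induction k using Nat.strong_induction_on with
  | _ k ih =>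
    rw [uv]
    by_cases h : k = 0
    · subst h; simp [U]
    · simp only [h, dif_neg, not_false_iff]
      have hdiv : k / 2 < k := Nat.div_lt_self (Nat.pos_of_ne_zero h) (by norm_num)
      obtain ⟨ha, hb⟩ := ih (k / 2) hdiv
      have he : (((2 * (uv (k / 2)).1 * ((uv (k / 2)).2 - 2 * (uv (k / 2)).1)) % 44711 : Int) :
          ZMod 44711) = U (2 * (k / 2)) := by
        rw [cast_emod, U_double]; push_cast [ha, hb]; ring
      have ho : ((((uv (k / 2)).2 * (uv (k / 2)).2 - (uv (k / 2)).1 * (uv (k / 2)).1) % 44711 :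
          Int) : ZMod 44711) = U (2 * (k / 2) + 1) := by
        rw [cast_emod, U_double_add_one]; push_cast [ha, hb]; ring
      by_cases hpar : k % 2 = 0
      · have hk : 2 * (k / 2) = k := by omega
        simp only [hpar, if_pos]
        rw [hk] at he ho
        exact ⟨he, ho⟩
      · have hk : 2 * (k / 2) + 1 = k := by omega
        simp only [hpar, if_neg, not_false_iff]
        constructor
        · have ho' := ho; rw [hk] at ho'; exact ho'
        · rw [cast_emod]
          push_cast
          rw [ho, he, show k + 1 = 2 * (k / 2) + 1 + 1 by omega,
            show U (2 * (k / 2) + 1 + 1) = 4 * U (2 * (k / 2) + 1) - U (2 * (k / 2)) from rfl]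

lemma main_even (L : Int) (h2 : PySem.Int.mod L 2 = 0) (h0 : L ≠ 0) (hL2 : L ≠ 2)
    (hpos : 0 ≤ L) : f L = f_alt L := by
  have hodd : ¬ (PySem.Int.mod L 2 ≠ 0) := fun hc => hc h2
  have hfd : PySem.Int.floordiv L 2 = L / 2 := PySem.Int.floordiv_eq_ediv_of_pos (by norm_num)
  have hmod : L % 2 = 0 := by rw [← PySem.Int.mod_eq_emod_of_pos (by norm_num : (0:Int) < 2)]; exact h2
  have hL4 : 4 ≤ L := by omega
  have hk2 : 2 ≤ L / 2 := by omega
  set kn : Nat := (L / 2).toNat with hkn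
  have hkn2 : 2 ≤ kn := by omega
  have htn : (L / 2 - 1).toNat = kn - 1 := by omega
  simp only [f, f_alt]
  rw [if_neg hodd, if_neg h0, if_neg hL2, if_neg hodd, if_neg h0, if_neg hL2]
  show ((0 + mget (matPow [[4, -1], [1, 0]] (PySem.Int.floordiv L 2 - 1)) 0 0 * 3
        + mget (matPow [[4, -1], [1, 0]] (PySem.Int.floordiv L 2 - 1)) 0 1 * 1) % pyMOD)
      = ((uv (PySem.Int.floordiv L 2).toNat).2 - (uv (PySem.Int.floordiv L 2).toNat).1) % 44711
  rw [hfd, ← hkn]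
  have hmp : matPow [[4, -1], [1, 0]] (L / 2 - 1)
      = matPowLoop [[4, -1], [1, 0]] [[1, 0], [0, 1]] (L / 2 - 1).toNat := rfl
  obtain ⟨hsq, htm⟩ := matPowLoop_spec ((L / 2 - 1).toNat) [[4, -1], [1, 0]] [[1, 0], [0, 1]]
    ⟨4, -1, 1, 0, rfl⟩ ⟨1, 0, 0, 1, rfl⟩
  obtain ⟨a, b, c, d, hE⟩ := hsq
  have hid : toM [[1, 0], [0, 1]] = 1 := by
    ext i j; fin_cases i <;> fin_cases j <;> simp [toM, mget]
  have hMzL : toM [[4, -1], [1, 0]] = Mz := by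
    ext i j; fin_cases i <;> fin_cases j <;> simp [toM, mget, Mz]
  rw [hE, hid, hMzL, one_mul, htn, show kn - 1 = (kn - 2) + 1 by omega, Mz_pow] at htm
  have ha : ((a : Int) : ZMod 44711) = U kn := by
    have := congrArg (fun m => m 0 0) htm
    simpa [toM, mget, show kn - 2 + 2 = kn by omega] using this
  have hb : ((b : Int) : ZMod 44711) = -U (kn - 1) := by
    have := congrArg (fun m => m 0 1) htm
    simpa [toM, mget, show kn - 2 + 1 = kn - 1 by omega] using this
  rw [hmp, hE]
  obtain ⟨hu1, hu2⟩ := uv_spec kn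
  apply int_eq_of_cast_eq
  · exact Int.emod_nonneg _ (by norm_num [pyMOD])
  · exact Int.emod_lt_of_pos _ (by norm_num [pyMOD])
  · exact Int.emod_nonneg _ (by norm_num)
  · exact Int.emod_lt_of_pos _ (by norm_num)
  · rw [show pyMOD = (44711 : Int) from rfl, cast_emod, cast_emod]
    push_cast
    rw [hu1, hu2]
    have hma : (mget [[a, b], [c, d]] 0 0 : ZMod 44711) = U kn := by simpa [mget] using ha
    have hmb : (mget [[a, b], [c, d]] 0 1 : ZMod 44711) = -U (kn - 1) := by simpa [mget] using hb
    rw [hma, hmb, show kn + 1 = (kn - 1) + 2 by omega,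
      show U ((kn - 1) + 2) = 4 * U ((kn - 1) + 1) - U (kn - 1) from rfl,
      show (kn - 1) + 1 = kn by omega]
    ring

-- ===== VERDICT (by name: the statement is the Claim_ definition above) =====
theorem f_spec : Claim_equal_f := by
  intro L _ hpre
  unfold Spec_f
  by_cases h1 : PySem.Int.mod L 2 ≠ 0
  · simp only [f, f_alt, if_pos h1]
  · rw [not_not] at h1
    by_cases h0 : L = 0
    · subst h0; decide
    · by_cases hL2 : L = 2
      · subst hL2; decide
      · have hmod : L % 2 = 0 := by
          rw [← PySem.Int.mod_eq_emod_of_pos (by norm_num : (0:Int) < 2)]; exact h1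
        have hpos : 0 ≤ L := by
          rcases hpre with h | h
          · exact h
          · omega
        exact main_even L h1 h0 hL2 hpos
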